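-- pv_equiv track=rewrite | github.com/JLongwell-SA/vigilant-palm-tree | utils/utils.py | split_chunk_by_subheadings
-- ===== SOURCE A (Python) =====
-- def split_chunk_by_subheadings(chunk_text, subheadings, parent_title=""):
--     split_chunks = []
--     current_title = None
--     current_lines = []
--
--     for para_text, style in subheadings:
--         if style in ['Heading 3', 'Heading 4', 'Heading 5', 'Heading 6', 'Heading 7', 'Heading 8', 'Heading 9']:
--             if current_title and current_lines:
--                 combined_title = f"{parent_title}\n{current_title}" if parent_title else current_title
--                 split_chunks.append(f"{combined_title}\n" + "\n".join(current_lines).strip())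
--             current_title = para_text.strip()
--             current_lines = []
--         else:
--             if current_title:
--                 current_lines.append(para_text)
--
--     if current_title and current_lines:
--         combined_title = f"{parent_title}\n{current_title}" if parent_title else current_title
--         split_chunks.append(f"{combined_title}\n" + "\n".join(current_lines).strip())
--
--     return split_chunks if split_chunks else [chunk_text]
-- ===== SOURCE B (Python) =====
-- HEADING_STYLES = ('Heading 3', 'Heading 4', 'Heading 5', 'Heading 6',
--                   'Heading 7', 'Heading 8', 'Heading 9')
--
--
-- def _next_heading(subs, j):
--     """Index of the first heading-style entry at or after j (len(subs) if none)."""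
--     while j < len(subs) and subs[j][1] not in HEADING_STYLES:
--         j += 1
--     return j
--
--
-- def split_chunk_by_subheadings(chunk_text, subheadings, parent_title=""):
--     # Two-pointer block scan: locate consecutive heading positions i < j and
--     # slice the body subheadings[i+1:j] out wholesale; no running accumulators.
--     subs = list(subheadings)
--     n = len(subs)
--     chunks = []
--     i = _next_heading(subs, 0)          # everything before the first heading is dropped
--     while i < n:
--         j = _next_heading(subs, i + 1)
--         title = subs[i][0].strip()
--         body = [p for p, _ in subs[i + 1:j]]
--         if title and body:
--             combined = f"{parent_title}\n{title}" if parent_title else title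
--             chunks.append(f"{combined}\n" + "\n".join(body).strip())
--         i = j
--     return chunks if chunks else [chunk_text]
-- ===== Notes on version B (the rewrite author's own statement) =====
-- stated objective: alternative
-- what changed: Replaces A's per-element state machine (current_title/current_lines accumulators, emit on each heading) with a two-pointer block scan: locate consecutive heading positions and slice each section body out of the list wholesale.
import Mathlib
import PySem

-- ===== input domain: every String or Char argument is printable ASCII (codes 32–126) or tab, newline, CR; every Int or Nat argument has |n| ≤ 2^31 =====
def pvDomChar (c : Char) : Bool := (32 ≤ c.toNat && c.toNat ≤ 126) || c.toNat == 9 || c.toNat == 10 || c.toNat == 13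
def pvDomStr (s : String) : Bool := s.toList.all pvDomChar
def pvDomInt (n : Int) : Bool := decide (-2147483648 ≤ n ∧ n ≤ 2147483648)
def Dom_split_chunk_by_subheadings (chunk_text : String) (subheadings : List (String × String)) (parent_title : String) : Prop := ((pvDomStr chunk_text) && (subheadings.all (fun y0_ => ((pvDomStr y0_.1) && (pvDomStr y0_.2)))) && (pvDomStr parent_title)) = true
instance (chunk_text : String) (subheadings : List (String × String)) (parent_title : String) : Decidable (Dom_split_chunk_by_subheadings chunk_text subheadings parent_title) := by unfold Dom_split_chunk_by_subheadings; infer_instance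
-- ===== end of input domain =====

-- B replaces A's per-element state machine (current_title/current_lines, emit on
-- each heading) by a two-pointer block scan: find consecutive heading positions
-- and slice each body out wholesale; same cost, a different decomposition.

-- the subheading styles that start a new section (shared literal list)
def pvHeadingStyles : List String :=
  ["Heading 3", "Heading 4", "Heading 5", "Heading 6", "Heading 7", "Heading 8", "Heading 9"]

-- f"{combined_title}\n" + "\n".join(lines).strip()  (identical f-string in both Pythons)
def pvFmt (parent_title title : String) (lines : List String) : String :=
  (if !(parent_title == "") then parent_title ++ "\n" ++ title else title)
    ++ "\n" ++ PySem.Str.strip (PySem.Str.join "\n" lines)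

-- ===== PORT A =====
-- Python truthiness of current_title (None or "" are falsy)
def pvTruthyOpt : Option String → Bool
  | some t => !(t == "")
  | none => false

-- 'if current_title and current_lines: split_chunks.append(...)'
def pvAFlush (pt : String) (st : List String × Option String × List String) : List String :=
  match st.2.1 with
  | some t => if !(t == "") && !st.2.2.isEmpty then st.1 ++ [pvFmt pt t st.2.2] else st.1
  | none => st.1

-- one iteration of A's for-loop over (split_chunks, current_title, current_lines)
def pvAStep (pt : String) (st : List String × Option String × List String)
    (x : String × String) : List String × Option String × List String :=
  if pvHeadingStyles.contains x.2 then
    (pvAFlush pt st, some (PySem.Str.strip x.1), [])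
  else
    (st.1, st.2.1, if pvTruthyOpt st.2.1 then st.2.2 ++ [x.1] else st.2.2)

def split_chunk_by_subheadings (chunk_text : String) (subheadings : List (String × String)) (parent_title : String) : List String :=
  let st := subheadings.foldl (pvAStep parent_title) ([], none, [])
  let chunks := pvAFlush parent_title st
  if chunks.isEmpty then [chunk_text] else chunks

-- ===== PORT B =====
def pvIsHeading (s : String) : Bool := pvHeadingStyles.contains s

-- '_next_heading(subs, j)': while j < len(subs) and subs[j][1] not in HEADING_STYLES: j += 1
def pvNextHeading (subs : List (String × String)) (j : Nat) : Nat :=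
  if h : j < subs.length then
    if pvIsHeading (subs[j].2) then j else pvNextHeading subs (j + 1)
  else j
termination_by subs.length - j

theorem pvNextHeading_ge (subs : List (String × String)) (j : Nat) :
    j ≤ pvNextHeading subs j := by
  unfold pvNextHeading
  split
  · split
    · exact Nat.le_refl _
    · exact Nat.le_trans (Nat.le_succ _) (pvNextHeading_ge subs (j + 1))
  · exact Nat.le_refl _
termination_by subs.length - j

-- B's while loop over heading positions i < j (state: i; chunks appended per block)
def pvBlocks (subs : List (String × String)) (pt : String) (i : Nat) : List String :=
  if h : i < subs.length then
    let j := pvNextHeading subs (i + 1)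
    let title := PySem.Str.strip (subs[i].1)
    let body := (PySem.List.slice subs (some ((i + 1 : Nat) : Int)) (some ((j : Nat) : Int))).map (·.1)
    (if !(title == "") && !body.isEmpty then [pvFmt pt title body] else []) ++ pvBlocks subs pt j
  else []
termination_by subs.length - i
decreasing_by
  have := pvNextHeading_ge subs (i + 1); omega

def split_chunk_by_subheadings_alt (chunk_text : String) (subheadings : List (String × String)) (parent_title : String) : List String :=
  let chunks := pvBlocks subheadings parent_title (pvNextHeading subheadings 0)
  if chunks.isEmpty then [chunk_text] else chunks

-- ===== PRECONDITION & SPEC =====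
def Spec_split_chunk_by_subheadings (chunk_text : String) (subheadings : List (String × String)) (parent_title : String) (out : List String) : Prop := out = split_chunk_by_subheadings_alt chunk_text subheadings parent_title
instance (chunk_text : String) (subheadings : List (String × String)) (parent_title : String) (out : List String) : Decidable (Spec_split_chunk_by_subheadings chunk_text subheadings parent_title out) := by unfold Spec_split_chunk_by_subheadings; infer_instance

-- ===== CLAIM (what is proved, stated in full; the proofs are below) =====
def Claim_equal_split_chunk_by_subheadings : Prop := ∀ (chunk_text : String) (subheadings : List (String × String)) (parent_title : String), Dom_split_chunk_by_subheadings chunk_text subheadings parent_title → Spec_split_chunk_by_subheadings chunk_text subheadings parent_title (split_chunk_by_subheadings chunk_text subheadings parent_title)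

-- ===== LEMMAS AND PROOFS =====

-- non-heading predicate as A's loop branches on it
def pvP : String × String → Bool := fun x => !pvIsHeading x.2

-- one section's emission: 'if title and lines'
def pvEmit (pt : String) (p : String × List String) : List String :=
  if !(p.1 == "") && !p.2.isEmpty then [pvFmt pt p.1 p.2] else []

-- the common middle form: the titled sections of the subheading list
def pvSecs (l : List (String × String)) : List (String × List String) :=
  match hd : l.dropWhile pvP with
  | [] => []
  | x :: rest =>
      (PySem.Str.strip x.1, (rest.takeWhile pvP).map (·.1)) :: pvSecs (rest.dropWhile pvP)
termination_by l.length
decreasing_by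
  have h1 : (l.dropWhile pvP).length ≤ l.length := l.length_dropWhile_le pvP
  rw [hd] at h1
  have h2 : (rest.dropWhile pvP).length ≤ rest.length := rest.length_dropWhile_le pvP
  simp at h1; omega

def pvAllEmit (pt : String) (secs : List (String × List String)) : List String :=
  secs.flatMap (pvEmit pt)

theorem pvSecs_nil : pvSecs [] = [] := by simp [pvSecs]

theorem pvSecs_cons_nonheading (x : String × String) (rest : List (String × String))
    (hx : pvP x = true) : pvSecs (x :: rest) = pvSecs rest := by
  conv_lhs => rw [pvSecs]
  conv_rhs => rw [pvSecs]
  rw [List.dropWhile_cons_of_pos hx]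

theorem pvSecs_cons_heading (x : String × String) (rest : List (String × String))
    (hx : pvP x = false) :
    pvSecs (x :: rest)
      = (PySem.Str.strip x.1, (rest.takeWhile pvP).map (·.1)) :: pvSecs (rest.dropWhile pvP) := by
  conv_lhs => rw [pvSecs]
  rw [List.dropWhile_cons_of_neg (by simp [hx])]

-- A's fold with an open section equals the already-closed chunks, the open
-- section completed by the non-heading run, then the remaining sections
theorem pvA_open (pt : String) (subs : List (String × String)) :
    ∀ (c : List String) (t : String) (ls : List String),
    pvAFlush pt (subs.foldl (pvAStep pt) (c, some t, ls))
      = c ++ pvEmit pt (t, ls ++ (subs.takeWhile pvP).map (·.1))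
          ++ pvAllEmit pt (pvSecs (subs.dropWhile pvP)) := by
  induction subs with
  | nil =>
      intro c t ls
      simp only [List.foldl_nil, List.takeWhile_nil, List.map_nil, List.append_nil,
        pvAllEmit, pvAFlush, pvEmit]
      split_ifs <;> simp [pvSecs_nil]
  | cons x rest ih =>
      intro c t ls
      by_cases hh : pvIsHeading x.2
      · have hx : pvP x = false := by simp [pvP, hh]
        have hA : pvAStep pt (c, some t, ls) x
            = (c ++ pvEmit pt (t, ls), some (PySem.Str.strip x.1), []) := by
          simp only [pvAStep, pvAFlush, pvEmit]
          rw [if_pos (by simpa [pvIsHeading] using hh)]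
          split_ifs <;> simp
        rw [List.foldl_cons, hA, ih, List.takeWhile_cons_of_neg (by simp [hx]),
            List.dropWhile_cons_of_neg (by simp [hx]), pvSecs_cons_heading x rest hx]
        simp [pvAllEmit]
      · have hx : pvP x = true := by simp [pvP, hh]
        have hnc : pvHeadingStyles.contains x.2 = false := by
          simpa [pvIsHeading] using hh
        rw [List.foldl_cons, List.takeWhile_cons_of_pos hx, List.dropWhile_cons_of_pos hx]
        by_cases ht : t = ""
        · have hA : pvAStep pt (c, some t, ls) x = (c, some t, ls) := by
            simp [pvAStep, pvTruthyOpt, ht,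
              (show x.2 ∉ pvHeadingStyles by simpa [pvIsHeading] using hh)]
          rw [hA, ih]
          simp [pvEmit, ht]
        · have hA : pvAStep pt (c, some t, ls) x = (c, some t, ls ++ [x.1]) := by
            simp [pvAStep, pvTruthyOpt, ht,
              (show x.2 ∉ pvHeadingStyles by simpa [pvIsHeading] using hh)]
          rw [hA, ih]
          simp
  
-- before any heading: A's fold from the initial state yields the sections' emissions
theorem pvA_none (pt : String) (subs : List (String × String)) :
    ∀ (ls : List String),
    pvAFlush pt (subs.foldl (pvAStep pt) ([], none, ls))
      = pvAllEmit pt (pvSecs subs) := by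
  induction subs with
  | nil => intro ls; simp [pvAFlush, pvSecs_nil, pvAllEmit]
  | cons x rest ih =>
      intro ls
      by_cases hh : pvIsHeading x.2
      · have hx : pvP x = false := by simp [pvP, hh]
        have hA : pvAStep pt ([], none, ls) x
            = (([] : List String), some (PySem.Str.strip x.1), []) := by
          simp [pvAStep, pvAFlush,
            (show x.2 ∈ pvHeadingStyles by simpa [pvIsHeading] using hh)]
        rw [List.foldl_cons, hA, pvA_open, pvSecs_cons_heading x rest hx]
        simp [pvAllEmit]
      · have hx : pvP x = true := by simp [pvP, hh]
        have hA : pvAStep pt ([], none, ls) x = (([] : List String), none, ls) := by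
          simp [pvAStep, pvTruthyOpt,
            (show x.2 ∉ pvHeadingStyles by simpa [pvIsHeading] using hh)]
        rw [List.foldl_cons, hA, ih, pvSecs_cons_nonheading x rest hx]

-- pvNextHeading scans exactly the non-heading run starting at j
theorem pvNextHeading_eq (subs : List (String × String)) (j : Nat) :
    pvNextHeading subs j = j + ((subs.drop j).takeWhile pvP).length := by
  unfold pvNextHeading
  split
  · rename_i h
    have hd : subs.drop j = subs[j] :: subs.drop (j + 1) := List.drop_eq_getElem_cons h
    split
    · rename_i hhead
      rw [hd, List.takeWhile_cons_of_neg (by simp [pvP, hhead])]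
      simp
    · rename_i hhead
      rw [pvNextHeading_eq subs (j + 1), hd,
          List.takeWhile_cons_of_pos (by simp [pvP, hhead])]
      simp; omega
  · rename_i h
    rw [List.drop_eq_nil_of_le (Nat.le_of_not_lt h)]
    simp
termination_by subs.length - j

-- a pvNextHeading result is past the end or a heading position
theorem pvNextHeading_spec (subs : List (String × String)) (j : Nat) :
    subs.length ≤ pvNextHeading subs j
      ∨ ∃ h : pvNextHeading subs j < subs.length, pvIsHeading (subs[pvNextHeading subs j].2) = true := by
  unfold pvNextHeading
  split
  · rename_i h
    split
    · rename_i hhead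
      exact Or.inr ⟨h, hhead⟩
    · exact pvNextHeading_spec subs (j + 1)
  · rename_i h
    exact Or.inl (Nat.le_of_not_lt h)
termination_by subs.length - j

theorem pv_take_takeWhile {α : Type} (p : α → Bool) (l : List α) :
    l.take (l.takeWhile p).length = l.takeWhile p := by
  induction l with
  | nil => simp
  | cons x rest ih =>
      by_cases hx : p x
      · rw [List.takeWhile_cons_of_pos hx]; simp [ih]
      · rw [List.takeWhile_cons_of_neg (by simp [hx])]; simp

theorem pv_drop_takeWhile {α : Type} (p : α → Bool) (l : List α) :
    l.drop (l.takeWhile p).length = l.dropWhile p := by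
  induction l with
  | nil => simp
  | cons x rest ih =>
      by_cases hx : p x
      · rw [List.takeWhile_cons_of_pos hx, List.dropWhile_cons_of_pos hx]; simpa using ih
      · rw [List.takeWhile_cons_of_neg (by simp [hx]), List.dropWhile_cons_of_neg (by simp [hx])]
        simp

theorem pv_dropWhile_idem {α : Type} (p : α → Bool) (l : List α) :
    (l.dropWhile p).dropWhile p = l.dropWhile p := by
  induction l with
  | nil => simp
  | cons x rest ih =>
      by_cases hx : p x
      · rw [List.dropWhile_cons_of_pos hx]; exact ih
      · rw [List.dropWhile_cons_of_neg (by simp [hx]), List.dropWhile_cons_of_neg (by simp [hx])]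

-- B's block scan from a heading position (or the end) yields the sections of the rest
theorem pvBlocks_eq (subs : List (String × String)) (pt : String) (i : Nat)
    (hi : ∀ h : i < subs.length, pvIsHeading (subs[i]'h).2 = true) :
    pvBlocks subs pt i = pvAllEmit pt (pvSecs (subs.drop i)) := by
  rw [pvBlocks]
  split
  · rename_i h
    dsimp only
    have hd : subs.drop i = subs[i] :: subs.drop (i + 1) := List.drop_eq_getElem_cons h
    have hj : pvNextHeading subs (i + 1) = (i + 1) + ((subs.drop (i + 1)).takeWhile pvP).length :=
      pvNextHeading_eq subs (i + 1)
    have hslice :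
        PySem.List.slice subs (some ((i + 1 : Nat) : Int)) (some ((pvNextHeading subs (i + 1) : Nat) : Int))
          = (subs.drop (i + 1)).takeWhile pvP := by
      rw [PySem.List.slice_natCast, hj]
      have : (i + 1) + ((subs.drop (i + 1)).takeWhile pvP).length - (i + 1)
          = ((subs.drop (i + 1)).takeWhile pvP).length := by omega
      rw [this, pv_take_takeWhile]
    have hrest : subs.drop (pvNextHeading subs (i + 1)) = (subs.drop (i + 1)).dropWhile pvP := by
      rw [hj, ← pv_drop_takeWhile pvP (subs.drop (i + 1)), List.drop_drop]
      try congr 1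
      try omega
    have htail := pvBlocks_eq subs pt (pvNextHeading subs (i + 1))
      (by
        intro hlt
        rcases pvNextHeading_spec subs (i + 1) with heq | ⟨h2, hh⟩
        · omega
        · exact hh)
    rw [hslice, htail, hrest, hd, pvSecs_cons_heading subs[i] (subs.drop (i + 1))
        (by simp [pvP, hi h])]
    simp [pvAllEmit, pvEmit]
  · rename_i h
    rw [List.drop_eq_nil_of_le (Nat.le_of_not_lt h)]
    simp [pvSecs_nil, pvAllEmit]
termination_by subs.length - i
decreasing_by
  have := pvNextHeading_ge subs (i + 1); omega

-- ===== VERDICT (by name: the statement is the Claim_ definition above) =====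
theorem split_chunk_by_subheadings_spec : Claim_equal_split_chunk_by_subheadings := by
  intro chunk_text subheadings parent_title _
  unfold Spec_split_chunk_by_subheadings
  unfold split_chunk_by_subheadings split_chunk_by_subheadings_alt
  have hB := pvBlocks_eq subheadings parent_title (pvNextHeading subheadings 0)
    (by
      intro hlt
      rcases pvNextHeading_spec subheadings 0 with heq | ⟨h2, hh⟩
      · omega
      · exact hh)
  have h0 : pvNextHeading subheadings 0 = ((subheadings.takeWhile pvP).length) := by
    simpa using pvNextHeading_eq subheadings 0
  have hdrop : subheadings.drop (pvNextHeading subheadings 0) = subheadings.dropWhile pvP := by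
    rw [h0, pv_drop_takeWhile]
  have hsecs : pvSecs (subheadings.dropWhile pvP) = pvSecs subheadings := by
    conv_rhs => rw [pvSecs]
    conv_lhs => rw [pvSecs]
    rw [pv_dropWhile_idem]
  dsimp only
  rw [hB, hdrop, hsecs, pvA_none]
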